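-- pv_equiv track=rewrite | github.com/matej-parizek/CTU-FEL-ALP | wordsearch.py | findy
-- ===== SOURCE A (Python) =====
-- def findy(word,pole):
--     slovo=[]
--     tabulkax = []
--     tabulkay = []
--     len_word = []
--     for i in range(len(word)):
--         for j in range(len(pole[0])):
--             if len(pole)-len(word[i])>=0:
--                 for k in range(len(pole)-len(word[i])+1):
--                     for l in range(len(word[i])):
--                         slovo.append(pole[k+l][j])
--                     if slovo == word[i]:
--                         tabulkax.append(k)
--                         tabulkay.append(j)
--                         len_word.append(len(word[i]))
--                     slovo =[]
--     return tabulkax, tabulkay, len_word, #sloupec, řádek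
-- ===== SOURCE B (Python) =====
-- def findy(word, pole):
--     # Pattern-major (bitap-style) search over a single flattened column-major
--     # text: candidate start positions are kept as encoded integers and filtered
--     # by one pattern position at a time; no per-position slice is ever built.
--     xs, ys, ls = [], [], []
--     if not word:
--         return xs, ys, ls
--     R = len(pole)
--     C = len(pole[0])
--     stride = R + 1
--     flat = []
--     for j in range(C):
--         for row in pole:
--             flat.append(row[j])
--         flat.append(None)  # column separator; never compared for any fitting word
--     for w in word:
--         L = len(w)
--         cand = [j * stride + k for j in range(C) for k in range(R - L + 1)]
--         for l in range(L):
--             wl = w[l]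
--             cand = [p for p in cand if flat[p + l] == wl]
--         for p in cand:
--             j, k = divmod(p, stride)
--             xs.append(k)
--             ys.append(j)
--             ls.append(L)
--     return xs, ys, ls
-- ===== Notes on version B (the rewrite author's own statement) =====
-- stated objective: faster
-- what changed: B flattens the grid once into a single column-major text with separators and runs a bitap-style pattern-major search on it: the viable start positions, kept as one list of encoded integers, are filtered by one pattern position at a time and decoded with divmod at the end, whereas A rebuilds a fresh vertical slice (slovo) cell by cell at every (word, column, offset) and compares whole lists.
import Mathlib
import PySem

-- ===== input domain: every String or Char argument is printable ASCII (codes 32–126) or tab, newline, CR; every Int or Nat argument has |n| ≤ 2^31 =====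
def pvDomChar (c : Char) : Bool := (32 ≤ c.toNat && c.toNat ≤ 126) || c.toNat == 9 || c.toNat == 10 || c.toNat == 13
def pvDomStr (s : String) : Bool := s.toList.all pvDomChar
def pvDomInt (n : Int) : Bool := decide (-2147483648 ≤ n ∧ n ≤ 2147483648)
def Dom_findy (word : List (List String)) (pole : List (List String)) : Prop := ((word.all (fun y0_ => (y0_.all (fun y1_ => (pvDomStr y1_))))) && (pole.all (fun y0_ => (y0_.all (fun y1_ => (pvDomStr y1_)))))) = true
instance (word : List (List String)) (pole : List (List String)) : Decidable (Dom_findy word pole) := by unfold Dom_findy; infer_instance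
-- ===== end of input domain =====

-- B replaces A's position-major search (build a full vertical slice at every start row and compare
-- whole lists) by a bitap-style pattern-major search over one flattened column-major text:
-- candidate start positions are kept as encoded integers and filtered by one pattern position at a
-- time; no per-position slice is ever built.

-- ===== PORT A =====
-- pole[r][c], totalised with defaults; only in-range cells are read under Pre_
def pvCell (pole : List (List String)) (r c : Int) : String :=
  PySem.List.pyGetD (PySem.List.pyGetD pole r []) c ""

def findy (word : List (List String)) (pole : List (List String)) : List Int × List Int × List Int :=
  -- state = (slovo, tabulkax, tabulkay, len_word)
  let st :=
    (List.range word.length).foldl (fun st (i : Nat) =>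
      (fun wi =>
        (List.range ((PySem.List.pyGetD pole 0 []).length)).foldl (fun st (j : Nat) =>
          if (pole.length : Int) - (wi.length : Int) ≥ 0 then
            (PySem.List.pyRange 0 ((pole.length : Int) - (wi.length : Int) + 1) 1).foldl (fun st (k : Int) =>
              let slovo := (List.range wi.length).foldl
                (fun sl (l : Nat) => sl ++ [pvCell pole (k + (l : Int)) (j : Int)]) st.1
              if slovo = wi then
                (([] : List String), st.2.1 ++ [k], st.2.2.1 ++ [(j : Int)], st.2.2.2 ++ [(wi.length : Int)])
              else (([] : List String), st.2.1, st.2.2.1, st.2.2.2)) st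
          else st) st) (word.getD i []))
      ((([], [], [], []) : List String × List Int × List Int × List Int))
  (st.2.1, st.2.2.1, st.2.2.2)

-- ===== PORT B =====
def findy_alt (word : List (List String)) (pole : List (List String)) : List Int × List Int × List Int :=
  if word = [] then ([], [], [])
  else
    let R := pole.length
    let C := (PySem.List.pyGetD pole 0 []).length
    let stride := R + 1
    -- flat column-major text, one `none` separator after each column
    let flat : List (Option String) :=
      (List.range C).foldl (fun f (j : Nat) =>
        (pole.foldl (fun f row => f ++ [some (PySem.List.pyGetD row (j : Int) "")]) f) ++ [none]) []
    word.foldl (fun t w =>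
      let cand0 := (List.range C).foldl (fun c (j : Nat) =>
          c ++ (PySem.List.pyRange 0 ((R : Int) - (w.length : Int) + 1) 1).map
            (fun k => (j : Int) * (stride : Int) + k)) []
      let cand := (List.range w.length).foldl
        (fun c (l : Nat) =>
          c.filter (fun p => PySem.List.pyGetD flat (p + (l : Int)) none == some (w.getD l ""))) cand0
      cand.foldl (fun t p =>
        (t.1 ++ [PySem.Int.mod p (stride : Int)],
         t.2.1 ++ [PySem.Int.floordiv p (stride : Int)],
         t.2.2 ++ [(w.length : Int)])) t)
      (([], [], []) : List Int × List Int × List Int)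

-- ===== PRECONDITION & SPEC =====
-- Pre_ excludes the inputs where the Python A raises IndexError (an empty grid with a nonempty
-- word list, and ragged grids — some row shorter than row 0 — searched for a word that actually
-- fits); on a ragged grid where every word is empty or longer than the column A happens to return
-- without reading any cell, while B's upfront column-major flattening itself raises IndexError.
def Pre_findy (word : List (List String)) (pole : List (List String)) : Prop :=
  word = [] ∨ (pole ≠ [] ∧ ∀ r ∈ pole, (pole.headD []).length ≤ r.length)
instance (word : List (List String)) (pole : List (List String)) : Decidable (Pre_findy word pole) := by unfold Pre_findy; infer_instance

def pvWitness_findy : List (List String) × List (List String) :=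
  ([["a"]], [["a", "b"], ["c", "a"]])

def Spec_findy (word : List (List String)) (pole : List (List String)) (out : List Int × List Int × List Int) : Prop := out = findy_alt word pole
instance (word : List (List String)) (pole : List (List String)) (out : List Int × List Int × List Int) : Decidable (Spec_findy word pole out) := by unfold Spec_findy; infer_instance

-- ===== CLAIM (what is proved, stated in full; the proofs are below) =====
def Claim_equal_findy : Prop := ∀ (word : List (List String)) (pole : List (List String)), Dom_findy word pole → Pre_findy word pole → Spec_findy word pole (findy word pole)

-- ===== LEMMAS AND PROOFS =====

-- the cell test A effectively applies at column j, start k, pattern position l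
def pvTest (pole : List (List String)) (w : List String) (j : Nat) (l : Nat) (k : Int) : Bool :=
  pvCell pole (k + (l : Int)) (j : Int) == w.getD l ""

-- full-match condition at start k (all pattern positions agree)
def pvOk (pole : List (List String)) (w : List String) (j : Nat) (k : Int) : Bool :=
  (List.range w.length).all (fun l => pvTest pole w j l k)

-- named copies of A's loop bodies (quadruple state)
def pvStepKA (pole : List (List String)) (wi : List String) (j : Nat) : (List String × List Int × List Int × List Int) → Int → (List String × List Int × List Int × List Int) :=
  fun st k =>
    let slovo := (List.range wi.length).foldl
      (fun sl (l : Nat) => sl ++ [pvCell pole (k + (l : Int)) (j : Int)]) st.1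
    if slovo = wi then
      (([] : List String), st.2.1 ++ [k], st.2.2.1 ++ [(j : Int)], st.2.2.2 ++ [(wi.length : Int)])
    else (([] : List String), st.2.1, st.2.2.1, st.2.2.2)

def pvStepJA (pole : List (List String)) (wi : List String) : (List String × List Int × List Int × List Int) → Nat → (List String × List Int × List Int × List Int) :=
  fun st j =>
    if (pole.length : Int) - (wi.length : Int) ≥ 0 then
      (PySem.List.pyRange 0 ((pole.length : Int) - (wi.length : Int) + 1) 1).foldl (pvStepKA pole wi j) st
    else st

def pvStepIA (pole : List (List String)) : (List String × List Int × List Int × List Int) → List String → (List String × List Int × List Int × List Int) :=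
  fun st wi => (List.range ((PySem.List.pyGetD pole 0 []).length)).foldl (pvStepJA pole wi) st

-- slovo-free triple-state bodies (A's loops once the empty slovo is threaded away)
def pvAppend (j : Nat) (L : Nat) : (List Int × List Int × List Int) → Int → (List Int × List Int × List Int) :=
  fun t k => (t.1 ++ [k], t.2.1 ++ [(j : Int)], t.2.2 ++ [(L : Int)])

def pvStepKB (pole : List (List String)) (w : List String) (j : Nat) : (List Int × List Int × List Int) → Int → (List Int × List Int × List Int) :=
  fun t k => if pvOk pole w j k then pvAppend j w.length t k else t

def pvStepJB (pole : List (List String)) (w : List String) : (List Int × List Int × List Int) → Nat → (List Int × List Int × List Int) :=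
  fun t j =>
    (PySem.List.pyRange 0 ((pole.length : Int) - (w.length : Int) + 1) 1).foldl (pvStepKB pole w j) t

def pvStepIB (pole : List (List String)) : (List Int × List Int × List Int) → List String → (List Int × List Int × List Int) :=
  fun t w => (List.range ((PySem.List.pyGetD pole 0 []).length)).foldl (pvStepJB pole w) t

def pvMid (word : List (List String)) (pole : List (List String)) : List Int × List Int × List Int :=
  word.foldl (pvStepIB pole) ([], [], [])

-- ===== A-side reduction to pvMid =====

-- slovo (a map over range) equals wi iff every pattern position agrees
theorem pvSlovo_iff (pole : List (List String)) (wi : List String) (j : Nat) (k : Int) :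
    ((List.range wi.length).map (fun (l : Nat) => pvCell pole (k + (l : Int)) (j : Int)) = wi)
      ↔ pvOk pole wi j k = true := by
  unfold pvOk pvTest
  constructor
  · intro h
    rw [List.all_eq_true]
    intro l hl
    have hl' := List.mem_range.mp hl
    have := congrArg (fun (xs : List String) => xs.getD l "") h
    simp only [List.getD_eq_getElem?_getD, List.getElem?_map] at this
    rw [List.getElem?_range hl'] at this
    simp only [Option.map_some, Option.getD_some] at this
    rw [this]
    exact beq_self_eq_true _
  · intro h
    rw [List.all_eq_true] at h
    apply List.ext_getElem
    · simp
    · intro i h1 h2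
      simp only [List.getElem_map, List.getElem_range]
      have := h i (List.mem_range.mpr (by simpa using h1))
      have heq := eq_of_beq this
      rw [heq, List.getD_eq_getElem]

-- folding over range(len xs) reading xs.getD i d is folding over xs
theorem pvFoldl_range_getD {α β : Type} (xs : List α) (d : α) (F : β → α → β) :
    ∀ (init : β),
      (List.range xs.length).foldl (fun st (i : Nat) => F st (xs.getD i d)) init = xs.foldl F init := by
  induction xs with
  | nil => intro init; rfl
  | cons x xs ih =>
    intro init
    rw [List.length_cons, List.range_succ_eq_map, List.foldl_cons, List.foldl_map]
    simp only [List.getD_cons_zero, List.getD_cons_succ]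
    exact ih (F init x)

-- loops whose step keeps the first (slovo) component empty
theorem pvFoldl_fst_nil {α β : Type} (f : List String × β → α → List String × β)
    (g : β → α → β) (h : ∀ t a, f ([], t) a = ([], g t a)) (xs : List α) :
    ∀ (t : β), xs.foldl f ([], t) = ([], xs.foldl g t) := by
  induction xs with
  | nil => intro t; rfl
  | cons x xs ih => intro t; rw [List.foldl_cons, h, List.foldl_cons]; exact ih (g t x)

theorem pvStepK_eq (pole : List (List String)) (wi : List String) (j : Nat) :
    ∀ (t : List Int × List Int × List Int) (k : Int), pvStepKA pole wi j ([], t) k = ([], pvStepKB pole wi j t k) := by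
  intro t k
  unfold pvStepKA pvStepKB
  simp only [PySem.List.foldl_append_singleton_eq_map, List.nil_append]
  by_cases hc : pvOk pole wi j k = true
  · rw [if_pos ((pvSlovo_iff pole wi j k).mpr hc), if_pos hc]; rfl
  · rw [if_neg (fun h => hc ((pvSlovo_iff pole wi j k).mp h)), if_neg hc]

theorem pvStepJ_eq (pole : List (List String)) (wi : List String) :
    ∀ (t : List Int × List Int × List Int) (j : Nat), pvStepJA pole wi ([], t) j = ([], pvStepJB pole wi t j) := by
  intro t j
  unfold pvStepJA pvStepJB
  by_cases hg : (pole.length : Int) - (wi.length : Int) ≥ 0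
  · rw [if_pos hg]
    exact pvFoldl_fst_nil _ _ (pvStepK_eq pole wi j) _ t
  · rw [if_neg hg, PySem.List.pyRange_one_eq_nil (by omega)]
    rfl

theorem pvStepI_eq (pole : List (List String)) :
    ∀ (t : List Int × List Int × List Int) (wi : List String), pvStepIA pole ([], t) wi = ([], pvStepIB pole t wi) := by
  intro t wi
  unfold pvStepIA pvStepIB
  exact pvFoldl_fst_nil _ _ (pvStepJ_eq pole wi) _ t

theorem pvA_eq_mid (word pole : List (List String)) : findy word pole = pvMid word pole := by
  show ((List.range word.length).foldl
      (fun st (i : Nat) => pvStepIA pole st (word.getD i [])) ([], ([], [], []))).2 = pvMid word pole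
  rw [pvFoldl_range_getD word ([] : List String) (pvStepIA pole) ([], ([], [], []))]
  rw [pvFoldl_fst_nil _ _ (pvStepI_eq pole) word ([], [], [])]
  rfl

-- ===== B-side reduction to pvMid =====

-- one column of the flat text: the column's cells then the `none` separator
def pvCol (pole : List (List String)) (j : Nat) : List (Option String) :=
  pole.map (fun row => some (PySem.List.pyGetD row (j : Int) "")) ++ [none]

def pvFlat (pole : List (List String)) (n : Nat) : List (Option String) :=
  (List.range n).flatMap (pvCol pole)

def pvKs (pole : List (List String)) (w : List String) : List Int :=
  PySem.List.pyRange 0 ((pole.length : Int) - (w.length : Int) + 1) 1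

def pvEnc (pole : List (List String)) (j : Nat) (k : Int) : Int :=
  (j : Int) * ((pole.length : Int) + 1) + k

theorem pvFlat_len (pole : List (List String)) (n : Nat) :
    (pvFlat pole n).length = n * (pole.length + 1) := by
  unfold pvFlat
  simp [List.length_flatMap, pvCol]

theorem pvFlat_get (pole : List (List String)) :
    ∀ (n j i : Nat), j < n → i < pole.length →
      (pvFlat pole n).getD (j * (pole.length + 1) + i) none
        = some (pvCell pole (i : Int) (j : Int)) := by
  intro n
  induction n with
  | zero => intro j i hj _; exact absurd hj (Nat.not_lt_zero j)
  | succ n ih =>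
    intro j i hj hi
    rw [pvFlat, List.range_succ, List.flatMap_append, List.flatMap_cons, List.flatMap_nil,
      List.append_nil]
    by_cases hjn : j < n
    · have hlen : j * (pole.length + 1) + i < ((List.range n).flatMap (pvCol pole)).length := by
        rw [← pvFlat, pvFlat_len]
        have : (j + 1) * (pole.length + 1) ≤ n * (pole.length + 1) :=
          Nat.mul_le_mul_right _ hjn
        nlinarith
      rw [List.getD_append _ _ _ _ hlen]
      exact ih j i hjn hi
    · have hje : j = n := by omega
      subst hje
      have hlen : ((List.range j).flatMap (pvCol pole)).length = j * (pole.length + 1) := by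
        rw [← pvFlat]; exact pvFlat_len pole j
      rw [List.getD_append_right _ _ _ _ (by omega), hlen]
      have hoff : j * (pole.length + 1) + i - j * (pole.length + 1) = i := by omega
      rw [hoff, pvCol]
      rw [List.getD_append _ _ _ _ (by simpa using hi)]
      have : (pole.map (fun row => some (PySem.List.pyGetD row (j : Int) ""))).getD i none
          = some (PySem.List.pyGetD (pole.getD i []) (j : Int) "") := by
        simp only [List.getD_eq_getElem?_getD, List.getElem?_map,
          List.getElem?_eq_getElem hi, Option.map_some, Option.getD_some]
      rw [this]
      simp [pvCell, PySem.List.pyGetD_natCast]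

-- B's successive filters over the pattern positions compute the full-match filter
theorem pvFilter_fold {α : Type} (T : Nat → α → Bool) :
    ∀ (n : Nat) (cand : List α),
      (List.range n).foldl (fun c (l : Nat) => c.filter (T l)) cand
        = cand.filter (fun k => (List.range n).all (fun l => T l k)) := by
  intro n
  induction n with
  | zero => intro cand; simp
  | succ n ih =>
    intro cand
    rw [List.range_succ, List.foldl_append, List.foldl_cons, List.foldl_nil, ih,
      List.filter_filter]
    congr 1
    funext k
    simp only [List.all_append, List.all_cons, List.all_nil, Bool.true_and, Bool.and_comm]

-- the flat-text test agrees with the cell test on every encoded viable start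
theorem pvFTest_eq (pole : List (List String)) (w : List String) (j : Nat) (n : Nat)
    (hj : j < n) (k : Int) (hk : k ∈ pvKs pole w) :
    ((List.range w.length).all (fun l =>
        PySem.List.pyGetD (pvFlat pole n) (pvEnc pole j k + (l : Int)) none == some (w.getD l "")))
      = pvOk pole w j k := by
  have hkb := (PySem.List.mem_pyRange_one).mp hk
  have hk0 : 0 ≤ k := hkb.1
  obtain ⟨kn, rfl⟩ : ∃ kn : Nat, k = (kn : Int) := ⟨k.toNat, (Int.toNat_of_nonneg hk0).symm⟩
  have hpt : ∀ l ∈ List.range w.length,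
      (PySem.List.pyGetD (pvFlat pole n) (pvEnc pole j (kn : Int) + (l : Int)) none == some (w.getD l ""))
        = pvTest pole w j l (kn : Int) := by
    intro l hl
    have hll := List.mem_range.mp hl
    have hkl : (kn : Int) + (l : Int) < (pole.length : Int) := by
      have := hkb.2
      omega
    have hkln : kn + l < pole.length := by exact_mod_cast hkl
    have hidx : pvEnc pole j (kn : Int) + (l : Int) = ((j * (pole.length + 1) + (kn + l) : Nat) : Int) := by
      unfold pvEnc; push_cast; ring
    rw [hidx, PySem.List.pyGetD_natCast, pvFlat_get pole n j (kn + l) hj hkln]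
    unfold pvTest
    have hc : ((kn : Int) + (l : Int)) = ((kn + l : Nat) : Int) := by push_cast; ring
    rw [hc]
    simp
  unfold pvOk
  rw [Bool.eq_iff_iff, List.all_eq_true, List.all_eq_true]
  exact ⟨fun h l hl => (hpt l hl) ▸ h l hl, fun h l hl => (hpt l hl).symm ▸ h l hl⟩

-- decoding an encoded position recovers the column and the start row
theorem pvDecode (pole : List (List String)) (j : Nat) (k : Int)
    (hk0 : 0 ≤ k) (hk1 : k < (pole.length : Int) + 1) :
    PySem.Int.floordiv (pvEnc pole j k) ((pole.length : Int) + 1) = (j : Int) ∧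
    PySem.Int.mod (pvEnc pole j k) ((pole.length : Int) + 1) = k := by
  have hpos : (0 : Int) < (pole.length : Int) + 1 := by positivity
  have hdiv : PySem.Int.floordiv (pvEnc pole j k) ((pole.length : Int) + 1) = (j : Int) := by
    rw [PySem.Int.floordiv_eq_iff_of_pos hpos]
    constructor
    · unfold pvEnc; linarith
    · unfold pvEnc
      have h1 : ((j : Int) + 1) * ((pole.length : Int) + 1)
          = (j : Int) * ((pole.length : Int) + 1) + ((pole.length : Int) + 1) := by ring
      rw [h1]; linarith
  refine ⟨hdiv, ?_⟩
  have h := PySem.Int.floordiv_mul_add_mod (pvEnc pole j k) ((pole.length : Int) + 1)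
  rw [hdiv] at h
  unfold pvEnc at h ⊢
  linarith

-- the zeta-reduced pieces of B's body, named for the proof
def pvFlatRaw (pole : List (List String)) : List (Option String) :=
  (List.range ((PySem.List.pyGetD pole 0 []).length)).foldl (fun f (j : Nat) =>
    (pole.foldl (fun f row => f ++ [some (PySem.List.pyGetD row (j : Int) "")]) f) ++ [none]) []

def pvCand0Raw (pole : List (List String)) (w : List String) : List Int :=
  (List.range ((PySem.List.pyGetD pole 0 []).length)).foldl (fun c (j : Nat) =>
    c ++ (PySem.List.pyRange 0 ((pole.length : Int) - (w.length : Int) + 1) 1).map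
      (fun k => (j : Int) * ((pole.length + 1 : Nat) : Int) + k)) []

theorem pvFlatRaw_eq (pole : List (List String)) :
    pvFlatRaw pole = pvFlat pole ((PySem.List.pyGetD pole 0 []).length) := by
  unfold pvFlatRaw pvFlat
  have hstep : ∀ (f : List (Option String)) (j : Nat),
      (pole.foldl (fun f row => f ++ [some (PySem.List.pyGetD row (j : Int) "")]) f) ++ [none]
        = f ++ pvCol pole j := by
    intro f j
    rw [PySem.List.foldl_append_singleton_eq_map, pvCol, List.append_assoc]
  rw [PySem.List.foldl_congr_mem _ _ (fun f j => f ++ pvCol pole j) _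
    (fun f j _ => hstep f j)]
  rw [PySem.List.foldl_append_eq_flatMap]
  simp

theorem pvCand0Raw_eq (pole : List (List String)) (w : List String) :
    pvCand0Raw pole w
      = (List.range ((PySem.List.pyGetD pole 0 []).length)).flatMap
          (fun j => (pvKs pole w).map (pvEnc pole j)) := by
  unfold pvCand0Raw
  rw [PySem.List.foldl_append_eq_flatMap]
  rw [List.nil_append]
  apply List.flatMap_congr
  intro j _
  apply List.map_congr_left
  intro k _
  unfold pvEnc
  push_cast
  ring

-- the whole per-word body of B equals A's per-word body
theorem pvInner (pole : List (List String)) (w : List String) (t : List Int × List Int × List Int) :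
    ((List.range w.length).foldl
      (fun c (l : Nat) =>
        c.filter (fun p => PySem.List.pyGetD (pvFlatRaw pole) (p + (l : Int)) none == some (w.getD l "")))
      (pvCand0Raw pole w)).foldl
      (fun t p =>
        (t.1 ++ [PySem.Int.mod p ((pole.length + 1 : Nat) : Int)],
         t.2.1 ++ [PySem.Int.floordiv p ((pole.length + 1 : Nat) : Int)],
         t.2.2 ++ [(w.length : Int)])) t
    = pvStepIB pole t w := by
  rw [pvFlatRaw_eq, pvCand0Raw_eq]
  rw [pvFilter_fold (fun (l : Nat) (p : Int) =>
    PySem.List.pyGetD (pvFlat pole ((PySem.List.pyGetD pole 0 []).length)) (p + (l : Int)) none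
      == some (w.getD l ""))]
  rw [List.filter_flatMap, List.foldl_flatMap]
  unfold pvStepIB
  apply PySem.List.foldl_congr_mem
  intro t j hj
  have hjn : j < (PySem.List.pyGetD pole 0 []).length := List.mem_range.mp hj
  rw [List.filter_map, List.foldl_map]
  have hfil : (pvKs pole w).filter
      ((fun p => (List.range w.length).all fun l =>
          PySem.List.pyGetD (pvFlat pole ((PySem.List.pyGetD pole 0 []).length)) (p + (l : Int)) none
            == some (w.getD l "")) ∘ pvEnc pole j)
      = (pvKs pole w).filter (pvOk pole w j) := by
    apply List.filter_congr
    intro k hk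
    exact pvFTest_eq pole w j _ hjn k hk
  rw [hfil]
  have hJB : pvStepJB pole w t j
      = ((pvKs pole w).filter (pvOk pole w j)).foldl (pvAppend j w.length) t :=
    PySem.List.foldl_if_eq_foldl_filter (pvOk pole w j) (pvAppend j w.length) (pvKs pole w) t
  rw [hJB]
  apply PySem.List.foldl_congr_mem
  intro t k hk
  have hk' := List.mem_filter.mp hk
  have hkb := (PySem.List.mem_pyRange_one).mp hk'.1
  have hdec := pvDecode pole j k hkb.1 (by have := hkb.2; omega)
  have hcast : ((pole.length + 1 : Nat) : Int) = (pole.length : Int) + 1 := by push_cast; ring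
  show (t.1 ++ [PySem.Int.mod (pvEnc pole j k) ((pole.length + 1 : Nat) : Int)],
        t.2.1 ++ [PySem.Int.floordiv (pvEnc pole j k) ((pole.length + 1 : Nat) : Int)],
        t.2.2 ++ [(w.length : Int)]) = pvAppend j w.length t k
  rw [hcast, hdec.1, hdec.2]
  rfl

theorem pvB_eq_mid (word pole : List (List String)) : findy_alt word pole = pvMid word pole := by
  by_cases hw : word = []
  · subst hw; rfl
  · have hred : findy_alt word pole
        = word.foldl (fun t w =>
            ((List.range w.length).foldl
              (fun c (l : Nat) =>
                c.filter (fun p =>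
                  PySem.List.pyGetD (pvFlatRaw pole) (p + (l : Int)) none == some (w.getD l "")))
              (pvCand0Raw pole w)).foldl
              (fun t p =>
                (t.1 ++ [PySem.Int.mod p ((pole.length + 1 : Nat) : Int)],
                 t.2.1 ++ [PySem.Int.floordiv p ((pole.length + 1 : Nat) : Int)],
                 t.2.2 ++ [(w.length : Int)])) t) ([], [], []) := by
      unfold findy_alt
      rw [if_neg hw]
      rfl
    rw [hred]
    unfold pvMid
    apply List.foldl_ext
    intro t w _
    exact pvInner pole w t

-- ===== VERDICT (by name: the statement is the Claim_ definition above) =====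
theorem findy_spec : Claim_equal_findy := by
  intro word pole _ _
  unfold Spec_findy
  rw [pvA_eq_mid, pvB_eq_mid]
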